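-- pv_equiv track=rewrite | github.com/Zep314/Py_HomeWork04 | extra_task02.py | GetNumSumm
-- ===== SOURCE A (Python) =====
-- def GetNumSumm(local_list):  # решение получилось какое-то непитоновское (((
--     ret = []
--     flag = False
--     for i in range(len(local_list)):
--         flag = False
--         if not local_list[i] in ret:
--             for j in range(len(local_list)-1): # последний элемент не берем
--                 for k in range(j+1,len(local_list)): # первый элемент не берем
--                     if local_list[i] == local_list[j] + local_list[k]:
--                         ret.append(local_list[i])
--                         flag = True
--                         break
--                 if flag: break # если нашли, то уже больше искать не надо
--     return ret
-- ===== SOURCE B (Python) =====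
-- def GetNumSumm(local_list):
--     sums = set()
--     for i, x in enumerate(local_list):
--         for y in local_list[i + 1:]:
--             sums.add(x + y)
--     return [x for x in dict.fromkeys(local_list) if x in sums]
-- ===== Notes on version B (the rewrite author's own statement) =====
-- stated objective: faster
-- what changed: B builds the set of all pairwise sums once (enumerate + tail slice), then returns the first-occurrence dedup of the list filtered by membership in that set, replacing A's per-element rescan of all index pairs.
import Mathlib
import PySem

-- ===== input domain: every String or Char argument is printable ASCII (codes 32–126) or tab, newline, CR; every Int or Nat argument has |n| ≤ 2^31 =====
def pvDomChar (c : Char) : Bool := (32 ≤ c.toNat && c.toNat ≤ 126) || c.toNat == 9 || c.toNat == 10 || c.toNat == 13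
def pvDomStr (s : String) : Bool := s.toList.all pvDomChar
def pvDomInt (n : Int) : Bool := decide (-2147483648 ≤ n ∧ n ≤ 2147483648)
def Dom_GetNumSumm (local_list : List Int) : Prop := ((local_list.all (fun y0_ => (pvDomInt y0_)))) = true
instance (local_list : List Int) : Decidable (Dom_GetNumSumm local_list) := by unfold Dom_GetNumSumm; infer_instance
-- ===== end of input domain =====

-- B precomputes the set of all pairwise sums in one O(n^2) pass and filters the
-- first-occurrence dedup of the list by membership, replacing A's O(n^3) per-element
-- rescan of all index pairs (objective: faster).

-- ===== PORT A =====
-- the inner double loop with flag/break: does some pair (j, k), j < k, sum to x?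
def condA (l : List Int) (x : Int) : Bool :=
  (PySem.List.pyRange 0 (PySem.List.len l - 1) 1).any (fun j =>
    (PySem.List.pyRange (j + 1) (PySem.List.len l) 1).any (fun k =>
      x == PySem.List.pyGetD l j 0 + PySem.List.pyGetD l k 0))

def GetNumSumm (local_list : List Int) : List Int :=
  (PySem.List.pyRange 0 (PySem.List.len local_list) 1).foldl
    (fun ret i =>
      let x := PySem.List.pyGetD local_list i 0
      if ret.contains x then ret
      else if condA local_list x then ret ++ [x] else ret)
    []

-- ===== PORT B =====
def GetNumSumm_alt (local_list : List Int) : List Int :=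
  let sums : PySem.Set Int :=
    (PySem.List.enumerate local_list 0).foldl
      (fun s p =>
        (PySem.List.slice local_list (some (p.1 + 1)) none).foldl
          (fun s y => PySem.Set.add s (p.2 + y)) s)
      PySem.Set.empty
  (PySem.List.dedup local_list).filter (fun x => PySem.Set.contains sums x)

-- ===== PRECONDITION & SPEC =====
def Spec_GetNumSumm (local_list : List Int) (out : List Int) : Prop := out = GetNumSumm_alt local_list
instance (local_list : List Int) (out : List Int) : Decidable (Spec_GetNumSumm local_list out) := by unfold Spec_GetNumSumm; infer_instance

-- ===== CLAIM (what is proved, stated in full; the proofs are below) =====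
def Claim_equal_GetNumSumm : Prop := ∀ (local_list : List Int), Dom_GetNumSumm local_list → Spec_GetNumSumm local_list (GetNumSumm local_list)

-- ===== LEMMAS AND PROOFS =====

-- "a is a sum of two elements of l at distinct positions j < k", the common spec
def IsPairSum (l : List Int) (a : Int) : Prop :=
  ∃ j k : Nat, j < k ∧ k < l.length ∧ a = l.getD j 0 + l.getD k 0

theorem mem_drop_iff_getD (l : List Int) (m : Nat) (y : Int) :
    y ∈ l.drop m ↔ ∃ i, m ≤ i ∧ i < l.length ∧ y = l.getD i 0 := by
  rw [List.mem_iff_getElem]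
  constructor
  · rintro ⟨j, hj, hy⟩
    rw [List.length_drop] at hj
    refine ⟨m + j, by omega, by omega, ?_⟩
    rw [List.getD_eq_getElem l 0 (by omega), ← hy, List.getElem_drop]
  · rintro ⟨i, h1, h2, rfl⟩
    refine ⟨i - m, by rw [List.length_drop]; omega, ?_⟩
    rw [List.getElem_drop, List.getD_eq_getElem l 0 (by omega)]
    congr 1; omega

-- A's flag/break double loop decides exactly IsPairSum
theorem condA_iff (l : List Int) (x : Int) : condA l x = true ↔ IsPairSum l x := by
  simp only [condA, IsPairSum, List.any_eq_true, PySem.List.mem_pyRange_one, beq_iff_eq,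
    PySem.List.len_eq]
  constructor
  · rintro ⟨j, ⟨hj0, hj1⟩, k, ⟨hk0, hk1⟩, h⟩
    refine ⟨j.toNat, k.toNat, by omega, by omega, ?_⟩
    have hjc : (j.toNat : Int) = j := by omega
    have hkc : (k.toNat : Int) = k := by omega
    rw [← hjc, ← hkc, PySem.List.pyGetD_natCast, PySem.List.pyGetD_natCast] at h
    exact h
  · rintro ⟨j, k, hjk, hk, h⟩
    refine ⟨(j : Int), ⟨by omega, by omega⟩, (k : Int), ⟨by omega, by omega⟩, ?_⟩
    rw [PySem.List.pyGetD_natCast, PySem.List.pyGetD_natCast]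
    exact h

-- membership in an inner 'for y in ys: s.add(f(y))' loop
theorem mem_foldl_add_map (f : Int → Int) (ys : List Int) :
    ∀ (s : PySem.Set Int) (a : Int),
      a ∈ ys.foldl (fun s y => PySem.Set.add s (f y)) s ↔ a ∈ s ∨ ∃ y ∈ ys, a = f y := by
  induction ys with
  | nil => simp
  | cons y ys ih =>
    intro s a
    simp only [List.foldl_cons, ih, PySem.Set.mem_add, List.mem_cons]
    constructor
    · rintro (( h | h) | ⟨z, hz, rfl⟩)
      · exact Or.inl h
      · exact Or.inr ⟨y, Or.inl rfl, h⟩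
      · exact Or.inr ⟨z, Or.inr hz, rfl⟩
    · rintro (h | ⟨z, (rfl | hz), rfl⟩)
      · exact Or.inl (Or.inl h)
      · exact Or.inl (Or.inr rfl)
      · exact Or.inr ⟨z, hz, rfl⟩

-- membership in B's whole nested sum-building loop
theorem mem_sums (l : List Int) (a : Int) :
    a ∈ (PySem.List.enumerate l 0).foldl
        (fun s p =>
          (PySem.List.slice l (some (p.1 + 1)) none).foldl
            (fun s y => PySem.Set.add s (p.2 + y)) s)
        PySem.Set.empty
      ↔ IsPairSum l a := by
  have gen : ∀ (ps : List (Int × Int)) (s : PySem.Set Int),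
      a ∈ ps.foldl
          (fun s p =>
            (PySem.List.slice l (some (p.1 + 1)) none).foldl
              (fun s y => PySem.Set.add s (p.2 + y)) s) s
        ↔ a ∈ s ∨ ∃ p ∈ ps, ∃ y ∈ PySem.List.slice l (some (p.1 + 1)) none, a = p.2 + y := by
    intro ps
    induction ps with
    | nil => simp
    | cons p ps ih =>
      intro s
      simp only [List.foldl_cons, ih, mem_foldl_add_map, List.mem_cons]
      constructor
      · rintro ((h | ⟨y, hy, rfl⟩) | ⟨q, hq, y, hy, rfl⟩)
        · exact Or.inl h
        · exact Or.inr ⟨p, Or.inl rfl, y, hy, rfl⟩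
        · exact Or.inr ⟨q, Or.inr hq, y, hy, rfl⟩
      · rintro (h | ⟨q, (rfl | hq), y, hy, rfl⟩)
        · exact Or.inl (Or.inl h)
        · exact Or.inl (Or.inr ⟨y, hy, rfl⟩)
        · exact Or.inr ⟨q, hq, y, hy, rfl⟩
  rw [gen]
  simp only [PySem.Set.empty, List.not_mem_nil, false_or, IsPairSum]
  constructor
  · rintro ⟨p, hp, y, hy, rfl⟩
    obtain ⟨j, hj, rfl⟩ := (PySem.List.mem_enumerate_iff l 0 p).mp hp
    simp only [zero_add] at hy ⊢
    have : ((j : Int) + 1) = ((j + 1 : Nat) : Int) := by push_cast; ring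
    rw [this, PySem.List.slice_from_natCast] at hy
    obtain ⟨k, hk1, hk2, rfl⟩ := (mem_drop_iff_getD l (j + 1) y).mp hy
    exact ⟨j, k, by omega, hk2, by rw [List.getD_eq_getElem l 0 (show j < l.length by omega)]⟩
  · rintro ⟨j, k, hjk, hk, rfl⟩
    refine ⟨((j : Int), l[j]'(by omega)), ?_, l.getD k 0, ?_, ?_⟩
    · rw [PySem.List.mem_enumerate_iff]
      exact ⟨j, by omega, by simp⟩
    · have : ((j : Int) + 1) = ((j + 1 : Nat) : Int) := by push_cast; ring
      rw [this, PySem.List.slice_from_natCast, mem_drop_iff_getD]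
      exact ⟨k, by omega, hk, rfl⟩
    · rw [List.getD_eq_getElem l 0 (show j < l.length by omega)]

-- A's accumulating loop is the filter of the running dedup
theorem foldA_eq_filter (p : Int → Bool) (xs : List Int) :
    ∀ (s : PySem.Set Int),
      xs.foldl
        (fun ret x =>
          if ret.contains x then ret
          else if p x then ret ++ [x] else ret)
        (s.filter p)
      = (xs.foldl PySem.Set.add s).filter p := by
  induction xs with
  | nil => intro s; rfl
  | cons x xs ih =>
    intro s
    simp only [List.foldl_cons]
    have step : (if (s.filter p).contains x then s.filter p
        else if p x then s.filter p ++ [x] else s.filter p)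
        = (PySem.Set.add s x).filter p := by
      by_cases hs : x ∈ s
      · have hadd : PySem.Set.add s x = s := by simp [PySem.Set.add, hs]
        rw [hadd]
        by_cases hp : p x
        · have hc : (s.filter p).contains x = true := by
            simp [List.mem_filter, hs, hp]
          rw [if_pos hc]
        · have hc : ¬ ((s.filter p).contains x = true) := by
            simp only [List.contains_eq_mem, List.mem_filter, decide_eq_true_eq, not_and]
            intro _; simp [hp]
          rw [if_neg hc, if_neg (by simp [hp])]
      · have hadd : PySem.Set.add s x = s ++ [x] := by simp [PySem.Set.add, hs]
        have hc : ¬ ((s.filter p).contains x = true) := by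
          simp only [List.contains_eq_mem, List.mem_filter, decide_eq_true_eq, not_and]
          intro h; exact absurd h hs
        rw [hadd, List.filter_append, if_neg hc]
        by_cases hp : p x
        · rw [if_pos hp]; simp [hp]
        · rw [if_neg (by simp [hp])]; simp [hp]
    rw [step, ih]

-- ===== VERDICT (by name: the statement is the Claim_ definition above) =====
theorem GetNumSumm_spec : Claim_equal_GetNumSumm := by
  intro l _
  show GetNumSumm l = GetNumSumm_alt l
  unfold GetNumSumm GetNumSumm_alt
  rw [PySem.List.foldl_pyRange_zero_pyGetD l 0
    (fun ret x => if ret.contains x then ret else if condA l x then ret ++ [x] else ret) []]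
  have h0 := foldA_eq_filter (condA l) l PySem.Set.empty
  simp only [PySem.Set.empty, List.filter_nil] at h0
  rw [h0]
  rw [PySem.List.dedup_eq_ofList, PySem.Set.ofList_eq_foldl]
  apply List.filter_congr
  intro x hx
  rw [Bool.eq_iff_iff, condA_iff]
  simp only [PySem.Set.contains, List.contains_eq_mem, decide_eq_true_eq]
  exact (mem_sums l x).symm
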